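-- pv_equiv track=rewrite | github.com/igorFNegrizoli/CompiladohDuMineirin | sintatico.py | has_B_in_block
-- ===== SOURCE A (Python) =====
-- def has_B_in_block(pilha):
--     has_B = False
--     for i in range(len(pilha)-1,0,-2):
--         token = pilha[i-1]
--         if token[0]=='{':
--             if has_B:
--                 return has_B
--             else:
--                 return has_B
--         elif token[0]=='B':
--             has_B = True
--     return False
-- ===== SOURCE B (Python) =====
-- def has_B_in_block(pilha):
--     n = len(pilha)
--     seen_brace = False
--     has_B = False
--     for j in range(n % 2, n - 1, 2):
--         token = pilha[j]
--         if token.startswith('{'):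
--             seen_brace = True
--             has_B = False
--         elif token.startswith('B'):
--             has_B = True
--     return seen_brace and has_B
-- ===== Notes on version B (the rewrite author's own statement) =====
-- stated objective: alternative
-- what changed: Replaces A's backward early-exit scan (stop at the first '{' seen from the top of the stack) by a single forward pass over the examined positions with a reset state machine: each '{' marks a brace seen and clears the B flag, each 'B' sets it, and the answer is brace-seen AND B-flag at the end (a 'B' after the last '{' going forward is exactly a 'B' before the first '{' going backward).
import Mathlib
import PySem

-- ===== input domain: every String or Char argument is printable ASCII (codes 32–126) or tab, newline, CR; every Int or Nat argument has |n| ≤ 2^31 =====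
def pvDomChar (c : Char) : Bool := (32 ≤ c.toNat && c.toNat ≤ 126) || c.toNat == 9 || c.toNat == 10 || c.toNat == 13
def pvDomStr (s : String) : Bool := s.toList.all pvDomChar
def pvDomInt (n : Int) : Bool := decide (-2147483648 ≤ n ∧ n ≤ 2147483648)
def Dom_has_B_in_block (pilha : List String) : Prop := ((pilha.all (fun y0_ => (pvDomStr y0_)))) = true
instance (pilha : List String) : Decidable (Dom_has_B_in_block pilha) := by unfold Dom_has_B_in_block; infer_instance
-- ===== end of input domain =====

-- B replaces A's backward early-exit scan by a single FORWARD pass with a reset state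
-- machine (alternative, same cost): equivalent wherever A returns; Pre_ excludes the
-- inputs on which A raises IndexError (empty examined token at/above the first '{').


-- ===== PORT A =====
-- the loop body of A: ranges over the remaining indices, carrying has_B
def hasBGoA (pilha : List String) : List Int → Bool → Bool
  | [], _ => false
  | i :: rest, hasB =>
    match PySem.List.pyGet? pilha (i - 1) with
    | none => false   -- IndexError (unreachable: pyRange indices are in range)
    | some token =>
      match PySem.Str.pyGet? token 0 with
      | none => false -- IndexError on token[0] (excluded by Pre_)
      | some c =>
        if c == '{' then (if hasB then hasB else hasB)
        else if c == 'B' then hasBGoA pilha rest true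
        else hasBGoA pilha rest hasB

def has_B_in_block (pilha : List String) : Bool :=
  hasBGoA pilha (PySem.List.pyRange ((pilha.length : Int) - 1) 0 (-2)) false

-- ===== PORT B =====
-- forward pass over range(n % 2, n - 1, 2): '{' sets seen_brace and clears has_B,
-- 'B' sets has_B; indices are always in range, so pyGet?'s default is never used
def has_B_in_block_alt (pilha : List String) : Bool :=
  let st :=
    (PySem.List.pyRange (PySem.Int.mod ((pilha.length : Int)) 2) ((pilha.length : Int) - 1) 2).foldl
      (fun (s : Bool × Bool) j =>
        let token := (PySem.List.pyGet? pilha j).getD ""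
        if PySem.Str.startswith token "{" then (true, false)
        else if PySem.Str.startswith token "B" then (s.1, true)
        else s)
      (false, false)
  st.1 && st.2

-- ===== PRECONDITION & SPEC =====
-- the token sequence A examines, top of stack first
def hasBSeq (pilha : List String) : List String :=
  (PySem.List.pyRange ((pilha.length : Int) - 1) 0 (-2)).map
    (fun i => (PySem.List.pyGet? pilha (i - 1)).getD "")

-- Pre_ excludes exactly the inputs where Python A raises IndexError: an empty token
-- among the examined tokens at or before the first one starting with '{'.
def hasBOk : List String → Bool
  | [] => true
  | t :: r =>
    (PySem.Str.pyGet? t 0).isSome && ((PySem.Str.pyGet? t 0 == some '{') || hasBOk r)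

def Pre_has_B_in_block (pilha : List String) : Prop := hasBOk (hasBSeq pilha) = true
instance (pilha : List String) : Decidable (Pre_has_B_in_block pilha) := by
  unfold Pre_has_B_in_block; infer_instance

def pvWitness_has_B_in_block : List String := ["B x", "y", "{", "z"]

def Spec_has_B_in_block (pilha : List String) (out : Bool) : Prop := out = has_B_in_block_alt pilha
instance (pilha : List String) (out : Bool) : Decidable (Spec_has_B_in_block pilha out) := by unfold Spec_has_B_in_block; infer_instance

-- ===== CLAIM (what is proved, stated in full; the proofs are below) =====
def Claim_equal_has_B_in_block : Prop := ∀ (pilha : List String), Dom_has_B_in_block pilha → Pre_has_B_in_block pilha → Spec_has_B_in_block pilha (has_B_in_block pilha)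

-- ===== LEMMAS AND PROOFS =====

-- proof-side intermediate: A's loop re-expressed over the token sequence
def hasBLoopT : List String → Bool → Bool
  | [], _ => false
  | t :: r, hasB =>
    match PySem.Str.pyGet? t 0 with
    | none => false
    | some c =>
      if c == '{' then (if hasB then hasB else hasB)
      else if c == 'B' then hasBLoopT r true
      else hasBLoopT r hasB

-- B's loop body, on tokens
def hasBStep (s : Bool × Bool) (token : String) : Bool × Bool :=
  if PySem.Str.startswith token "{" then (true, false)
  else if PySem.Str.startswith token "B" then (s.1, true)
  else s

-- the token sequence B examines, bottom first (reverse of hasBSeq — proved below)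
def hasBFSeq (pilha : List String) : List String :=
  (PySem.List.pyRange (PySem.Int.mod ((pilha.length : Int)) 2) ((pilha.length : Int) - 1) 2).map
    (fun j => (PySem.List.pyGet? pilha j).getD "")

-- every index produced by A's range is in bounds, so the list lookup succeeds
theorem hasB_idx_some (pilha : List String) (i : Int)
    (hi : i ∈ PySem.List.pyRange ((pilha.length : Int) - 1) 0 (-2)) :
    (PySem.List.pyGet? pilha (i - 1)).isSome := by
  rw [PySem.List.mem_pyRange_iff_of_neg (by norm_num)] at hi
  obtain ⟨h1, h2, -⟩ := hi
  have h := PySem.List.pyGet?_eq_some_getElem pilha (i := i - 1) (by omega) (by omega)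
  rw [h]; rfl

-- A's index loop equals the token loop over the materialised sequence
theorem hasBGoA_eq_loopT (pilha : List String) (idxs : List Int) (hasB : Bool)
    (h : ∀ i ∈ idxs, (PySem.List.pyGet? pilha (i - 1)).isSome) :
    hasBGoA pilha idxs hasB
      = hasBLoopT (idxs.map (fun i => (PySem.List.pyGet? pilha (i - 1)).getD "")) hasB := by
  induction idxs generalizing hasB with
  | nil => rfl
  | cons i rest ih =>
    obtain ⟨t, ht⟩ := Option.isSome_iff_exists.mp (h i (by simp))
    have hrest : ∀ j ∈ rest, (PySem.List.pyGet? pilha (j - 1)).isSome := by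
      intro j hj; exact h j (by simp [hj])
    simp only [hasBGoA, List.map_cons, hasBLoopT, ht, Option.getD_some]
    cases hc : PySem.Str.pyGet? t 0 with
    | none => rfl
    | some c =>
      by_cases h1 : c = '{'
      · simp [h1]
      · by_cases h2 : c = 'B' <;> simp [h1, h2, ih _ hrest]

-- A's examined index sequence (shifted by the -1) is the reverse of B's
theorem hasB_range_rev (n : Nat) :
    (PySem.List.pyRange ((n : Int) - 1) 0 (-2)).map (fun i => i - 1)
      = (PySem.List.pyRange (PySem.Int.mod ((n : Int)) 2) ((n : Int) - 1) 2).reverse := by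
  have hmod : PySem.Int.mod ((n : Int)) 2 = (n : Int) % 2 :=
    PySem.Int.mod_eq_emod_of_pos (by norm_num)
  rw [hmod]
  simp only [PySem.List.pyRange]
  norm_num
  have hc1 : (if 1 < n then (((n : Int) - 1 + 2 - 1) / 2).toNat else 0) = n / 2 := by
    split_ifs with h <;> omega
  have hc2 : (if (n : Int) % 2 < (n : Int) - 1
      then (((n : Int) - 1 - (n : Int) % 2 + 2 - 1) / 2).toNat else 0) = n / 2 := by
    split_ifs with h <;> omega
  rw [hc1, hc2]
  apply List.ext_getElem
  · simp
  · intro i h1 h2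
    simp only [List.length_map, List.length_range] at h1
    simp only [List.getElem_reverse, List.getElem_map, List.getElem_range, Function.comp_apply,
      List.length_map, List.length_range]
    omega

-- hence the two token sequences are reverses of each other
theorem hasBSeq_eq_rev (pilha : List String) :
    hasBSeq pilha = (hasBFSeq pilha).reverse := by
  unfold hasBSeq hasBFSeq
  rw [show (fun i => (PySem.List.pyGet? pilha (i - 1)).getD "")
        = (fun j => (PySem.List.pyGet? pilha j).getD "") ∘ (fun i : Int => i - 1) from rfl,
    ← List.map_map, hasB_range_rev pilha.length, List.map_reverse]

-- for a nonempty token, startswith a single char tests the first char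
theorem startswith_head (t : String) (c : Char) (h : PySem.Str.pyGet? t 0 = some c) (p : Char) :
    PySem.Str.startswith t (String.ofList [p]) = (c == p) := by
  rw [PySem.Str.startswith_eq]
  have hl : ∃ rest, t.toList = c :: rest := by
    simp only [PySem.Str.pyGet?_eq] at h
    cases hl : t.toList with
    | nil => rw [hl] at h; simp [PySem.List.pyGet?] at h
    | cons c' rest =>
      rw [hl] at h
      have : c' = c := by simpa [PySem.List.pyGet?, PySem.List.pyIdx?] using h
      exact ⟨rest, by rw [this]⟩
  obtain ⟨rest, hl⟩ := hl
  rw [hl]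
  simp only [String.toList_ofList]
  by_cases hp : c = p
  · subst hp
    simp [PySem.Chars.startswith_iff, List.cons_prefix_cons]
  · have hnp : ¬ ([p] <+: c :: rest) := by
      intro hpre
      exact hp ((List.cons_prefix_cons.mp hpre).1.symm)
    have hf : PySem.Chars.startswith (c :: rest) [p] = false := by
      rw [Bool.eq_false_iff]
      intro htrue
      exact hnp (PySem.Chars.startswith_iff _ _ |>.mp htrue)
    rw [hf]
    simp [hp]

-- the backward early-exit loop equals the forward reset state machine
theorem loopT_eq_fold (rseq : List String) (hok : hasBOk rseq = true) (b : Bool) :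
    hasBLoopT rseq b
      = ((rseq.reverse.foldl hasBStep (false, false)).1
          && (b || (rseq.reverse.foldl hasBStep (false, false)).2)) := by
  induction rseq generalizing b with
  | nil => simp [hasBLoopT]
  | cons t r ih =>
    simp only [hasBOk, Bool.and_eq_true, Bool.or_eq_true] at hok
    obtain ⟨hsome, hrest⟩ := hok
    obtain ⟨c, hc⟩ := Option.isSome_iff_exists.mp hsome
    have hbrace : PySem.Str.startswith t "{" = (c == '{') := startswith_head t c hc '{'
    have hB : PySem.Str.startswith t "B" = (c == 'B') := startswith_head t c hc 'B'
    have hunf : hasBLoopT (t :: r) b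
        = (if c == '{' then (if b then b else b)
           else if c == 'B' then hasBLoopT r true else hasBLoopT r b) := by
      simp only [hasBLoopT, hc]
    rw [hunf, List.reverse_cons, List.foldl_append, List.foldl_cons, List.foldl_nil]
    have hstep : hasBStep (r.reverse.foldl hasBStep (false, false)) t
        = (if c == '{' then (true, false)
           else if c == 'B' then ((r.reverse.foldl hasBStep (false, false)).1, true)
           else r.reverse.foldl hasBStep (false, false)) := by
      simp only [hasBStep, hbrace, hB]
    rw [hstep]
    by_cases h1 : c = '{'
    · simp [h1]
    · have hokr : hasBOk r = true := by
        rcases hrest with h | h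
        · rw [hc] at h; simp at h; exact absurd h h1
        · exact h
      have hc1 : (c == '{') = false := by simp [h1]
      by_cases h2 : c = 'B'
      · subst h2
        have hc2 : (('B' : Char) == 'B') = true := by decide
        simp only [hc1, hc2, Bool.false_eq_true, if_false, if_true]
        rw [ih hokr true]
        simp
      · have hc2 : (c == 'B') = false := by simp [h2]
        simp only [hc1, hc2, Bool.false_eq_true, if_false]
        exact ih hokr b

-- ===== VERDICT (by name: the statement is the Claim_ definition above) =====
theorem has_B_in_block_spec : Claim_equal_has_B_in_block := by
  intro pilha _ hpre
  unfold Spec_has_B_in_block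
  unfold Pre_has_B_in_block at hpre
  rw [has_B_in_block, hasBGoA_eq_loopT pilha _ false (fun i hi => hasB_idx_some pilha i hi)]
  rw [show (PySem.List.pyRange ((pilha.length : Int) - 1) 0 (-2)).map
        (fun i => (PySem.List.pyGet? pilha (i - 1)).getD "") = hasBSeq pilha from rfl]
  rw [loopT_eq_fold _ hpre false]
  rw [hasBSeq_eq_rev, List.reverse_reverse]
  unfold has_B_in_block_alt hasBFSeq
  rw [List.foldl_map]
  rfl
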